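-- pv_equiv track=rewrite | github.com/sargupta/sahayakai | sahayakai-main/services/voice-server/src/call_store.py | _classify_reason
-- ===== SOURCE A (Python) =====
-- def _classify_reason(reason: str) -> str:
--     """Map free-text reason to category enum."""
--     reason_lower = reason.lower()
--     if any(w in reason_lower for w in ("absent", "attendance", "not coming", "nahi aa")):
--         return "consecutive_absences"
--     if any(w in reason_lower for w in ("exam", "marks", "score", "performance", "padhai", "result")):
--         return "poor_performance"
--     if any(w in reason_lower for w in ("behav", "fight", "discipline", "bully", "vyavhar")):
--         return "behavioral_concern"
--     if any(w in reason_lower for w in ("good", "improv", "excellent", "positive", "proud")):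
--         return "positive_feedback"
--     return "other"
-- ===== SOURCE B (Python) =====
-- # Inverted index: each keyword maps to the priority rank of its category.
-- KEYWORD_PRIORITY = {
--     "absent": 0, "attendance": 0, "not coming": 0, "nahi aa": 0,
--     "exam": 1, "marks": 1, "score": 1, "performance": 1, "padhai": 1, "result": 1,
--     "behav": 2, "fight": 2, "discipline": 2, "bully": 2, "vyavhar": 2,
--     "good": 3, "improv": 3, "excellent": 3, "positive": 3, "proud": 3,
-- }
--
-- CATEGORIES = ("consecutive_absences", "poor_performance",
--               "behavioral_concern", "positive_feedback", "other")
--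
-- def _classify_reason(reason: str) -> str:
--     """Map free-text reason to category enum."""
--     reason_lower = reason.lower()
--     best = 4
--     for kw, p in KEYWORD_PRIORITY.items():
--         if kw in reason_lower:
--             best = min(best, p)
--     return CATEGORIES[best]
-- ===== Notes on version B (the rewrite author's own statement) =====
-- stated objective: alternative
-- what changed: Replaces the four ordered early-return branches with an inverted keyword-to-priority index: one flat scan over all keywords aggregates the minimum matched priority rank, which then indexes the category tuple.
import Mathlib
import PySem

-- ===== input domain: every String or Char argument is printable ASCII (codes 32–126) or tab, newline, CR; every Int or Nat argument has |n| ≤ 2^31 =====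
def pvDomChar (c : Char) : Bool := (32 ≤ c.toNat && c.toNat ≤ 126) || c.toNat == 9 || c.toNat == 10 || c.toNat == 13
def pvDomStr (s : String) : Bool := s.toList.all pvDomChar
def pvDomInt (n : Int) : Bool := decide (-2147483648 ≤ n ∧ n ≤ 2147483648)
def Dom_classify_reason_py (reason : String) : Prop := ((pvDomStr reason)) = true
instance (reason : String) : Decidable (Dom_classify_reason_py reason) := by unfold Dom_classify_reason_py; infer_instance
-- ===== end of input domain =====

-- B replaces A's four ordered early-return branches with an inverted keyword→priority index:
-- one flat scan aggregates the minimum matched priority, which indexes the category tuple (alternative; same cost).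

-- ===== PORT A =====
def classify_reason_py (reason : String) : String :=
  let reason_lower := PySem.Str.lower reason
  if PySem.Str.isIn "absent" reason_lower || PySem.Str.isIn "attendance" reason_lower ||
     PySem.Str.isIn "not coming" reason_lower || PySem.Str.isIn "nahi aa" reason_lower then
    "consecutive_absences"
  else if PySem.Str.isIn "exam" reason_lower || PySem.Str.isIn "marks" reason_lower ||
     PySem.Str.isIn "score" reason_lower || PySem.Str.isIn "performance" reason_lower ||
     PySem.Str.isIn "padhai" reason_lower || PySem.Str.isIn "result" reason_lower then
    "poor_performance"
  else if PySem.Str.isIn "behav" reason_lower || PySem.Str.isIn "fight" reason_lower ||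
     PySem.Str.isIn "discipline" reason_lower || PySem.Str.isIn "bully" reason_lower ||
     PySem.Str.isIn "vyavhar" reason_lower then
    "behavioral_concern"
  else if PySem.Str.isIn "good" reason_lower || PySem.Str.isIn "improv" reason_lower ||
     PySem.Str.isIn "excellent" reason_lower || PySem.Str.isIn "positive" reason_lower ||
     PySem.Str.isIn "proud" reason_lower then
    "positive_feedback"
  else
    "other"

-- ===== PORT B =====
-- KEYWORD_PRIORITY in insertion order (dict → association list)
def pvKeywordPriority : List (String × Int) :=
  [ ("absent", 0), ("attendance", 0), ("not coming", 0), ("nahi aa", 0),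
    ("exam", 1), ("marks", 1), ("score", 1), ("performance", 1), ("padhai", 1), ("result", 1),
    ("behav", 2), ("fight", 2), ("discipline", 2), ("bully", 2), ("vyavhar", 2),
    ("good", 3), ("improv", 3), ("excellent", 3), ("positive", 3), ("proud", 3) ]

def pvCategories : List String :=
  ["consecutive_absences", "poor_performance", "behavioral_concern", "positive_feedback", "other"]

def classify_reason_py_alt (reason : String) : String :=
  let reason_lower := PySem.Str.lower reason
  let best : Int := pvKeywordPriority.foldl
    (fun best kp => if PySem.Str.isIn kp.1 reason_lower then min best kp.2 else best) 4
  -- CATEGORIES[best]: best always lies in [0,4], so the .getD default is never used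
  (PySem.List.pyGet? pvCategories best).getD ""

-- ===== PRECONDITION & SPEC =====
def Spec_classify_reason_py (reason : String) (out : String) : Prop := out = classify_reason_py_alt reason
instance (reason : String) (out : String) : Decidable (Spec_classify_reason_py reason out) := by unfold Spec_classify_reason_py; infer_instance

-- ===== CLAIM (what is proved, stated in full; the proofs are below) =====
def Claim_equal_classify_reason_py : Prop := ∀ (reason : String), Dom_classify_reason_py reason → Spec_classify_reason_py reason (classify_reason_py reason)

-- ===== LEMMAS AND PROOFS =====

-- folding min over a constant-priority group collapses to one 'any' test
theorem pv_fold_group (rl : String) (p acc : Int) (kws : List String) :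
    (kws.map (fun kw => (kw, p))).foldl
        (fun best kp => if PySem.Str.isIn kp.1 rl then min best kp.2 else best) acc
      = if kws.any (fun kw => PySem.Str.isIn kw rl) then min acc p else acc := by
  induction kws generalizing acc with
  | nil => simp
  | cons k ks ih =>
      simp only [List.map_cons, List.foldl_cons, List.any_cons]
      by_cases h : PySem.Str.isIn k rl = true
      · rw [if_pos h, ih]
        simp only [h, Bool.true_or]
        split <;> simp
      · have h' : PySem.Str.isIn k rl = false := by
          revert h; cases PySem.Str.isIn k rl <;> simp
        rw [if_neg h]
        simp only [h', Bool.false_or]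
        exact ih acc

theorem classify_reason_py_spec_aux (reason : String) :
    classify_reason_py reason = classify_reason_py_alt reason := by
  unfold classify_reason_py classify_reason_py_alt
  have hsplit : pvKeywordPriority
      = (["absent", "attendance", "not coming", "nahi aa"].map (fun kw => (kw, (0:Int))))
        ++ (["exam", "marks", "score", "performance", "padhai", "result"].map (fun kw => (kw, (1:Int))))
        ++ (["behav", "fight", "discipline", "bully", "vyavhar"].map (fun kw => (kw, (2:Int))))
        ++ (["good", "improv", "excellent", "positive", "proud"].map (fun kw => (kw, (3:Int)))) := by
    rfl
  rw [hsplit]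
  simp only [List.foldl_append, pv_fold_group, List.any_cons, List.any_nil, Bool.or_false,
    Bool.or_assoc]
  split_ifs <;> simp_all <;> decide

-- ===== VERDICT (by name: the statement is the Claim_ definition above) =====
theorem classify_reason_py_spec : Claim_equal_classify_reason_py := by
  intro reason _
  unfold Spec_classify_reason_py
  exact classify_reason_py_spec_aux reason
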